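-- pv_equiv track=rewrite | github.com/Andresgarciawa/smartcommerce-microservices | services/catalog/service.py | _build_inventory_index
-- ===== SOURCE A (Python) =====
-- from typing import Any
--
-- def _build_inventory_index(items: list[dict[str, Any]]) -> dict[str, dict[str, int]]:
--     index: dict[str, dict[str, int]] = {}
--     for item in items:
--         ref = str(item.get("book_reference", "")).strip()
--         if not ref:
--             continue
--         if ref not in index:
--             index[ref] = {
--                 "quantity_available_total": 0,
--                 "quantity_reserved_total": 0,
--                 "inventory_records": 0,
--             }
--         index[ref]["quantity_available_total"] += int(item.get("quantity_available", 0))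
--         index[ref]["quantity_reserved_total"] += int(item.get("quantity_reserved", 0))
--         index[ref]["inventory_records"] += 1
--     return index
-- ===== SOURCE B (Python) =====
-- def _build_inventory_index(items):
--     # pass 1: normalize to (ref, qty_available, qty_reserved) triples, dropping empty refs
--     triples = []
--     for item in items:
--         ref = str(item.get("book_reference", "")).strip()
--         if ref:
--             triples.append((ref,
--                             int(item.get("quantity_available", 0)),
--                             int(item.get("quantity_reserved", 0))))
--     # pass 2: group by ref in first-occurrence order and total each group
--     index = {}
--     for ref in dict.fromkeys(t[0] for t in triples):
--         group = [(a, r) for (x, a, r) in triples if x == ref]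
--         index[ref] = {
--             "quantity_available_total": sum(a for a, _ in group),
--             "quantity_reserved_total": sum(r for _, r in group),
--             "inventory_records": len(group),
--         }
--     return index
-- ===== Notes on version B (the rewrite author's own statement) =====
-- stated objective: alternative
-- what changed: Replaces the single-pass dict-accumulation (create-then-increment per item) by a two-phase decomposition: first normalize items to (ref, available, reserved) triples dropping empty refs, then for each first-occurrence-deduplicated ref build its totals by filtering and summing the triples.
import Mathlib
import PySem

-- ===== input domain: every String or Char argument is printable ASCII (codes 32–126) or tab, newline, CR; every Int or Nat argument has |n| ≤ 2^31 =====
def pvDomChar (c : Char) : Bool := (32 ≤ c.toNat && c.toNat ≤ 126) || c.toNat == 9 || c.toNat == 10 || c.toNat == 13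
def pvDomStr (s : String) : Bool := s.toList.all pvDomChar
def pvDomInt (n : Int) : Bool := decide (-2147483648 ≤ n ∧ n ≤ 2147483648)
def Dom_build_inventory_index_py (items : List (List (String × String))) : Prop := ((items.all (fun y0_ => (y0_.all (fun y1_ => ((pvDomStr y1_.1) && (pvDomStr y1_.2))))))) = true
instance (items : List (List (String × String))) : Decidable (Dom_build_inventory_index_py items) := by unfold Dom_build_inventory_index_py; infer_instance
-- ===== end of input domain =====

-- B replaces A's single-pass dict accumulation by a normalize-then-group-then-sum decomposition (alternative structure, same results; return-value equivalence).

-- shared helpers: ref = str(item.get("book_reference","")).strip(); int(item.get(k,0)) as Option (none = ValueError)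
def pvRef (item : List (String × String)) : String :=
  PySem.Str.strip ((PySem.Dict.mk item).getD "book_reference" "")

def pvQty (item : List (String × String)) (k : String) : Option Int :=
  match (PySem.Dict.mk item).get? k with
  | none => some 0
  | some s => PySem.Int.ofStr? s

-- ===== PORT A =====
def build_inventory_index_py (items : List (List (String × String))) : List (String × List (String × Int)) :=
  (items.foldl (fun index item =>
    let ref := pvRef item
    if ref = "" then index
    else
      let index := if index.contains ref then index
        else index.insert ref (PySem.Dict.mk
          [("quantity_available_total", (0 : Int)),
           ("quantity_reserved_total", 0),
           ("inventory_records", 0)])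
      let index := index.modify ref PySem.Dict.empty
        (fun d => d.modify "quantity_available_total" 0 (· + (pvQty item "quantity_available").getD 0))
      let index := index.modify ref PySem.Dict.empty
        (fun d => d.modify "quantity_reserved_total" 0 (· + (pvQty item "quantity_reserved").getD 0))
      index.modify ref PySem.Dict.empty
        (fun d => d.modify "inventory_records" 0 (· + 1))
    ) PySem.Dict.empty).items.map (fun p => (p.1, p.2.items))

-- ===== PORT B =====
def build_inventory_index_py_alt (items : List (List (String × String))) : List (String × List (String × Int)) :=
  let ts := items.foldl (fun acc item =>
    if pvRef item != "" then
      acc ++ [(pvRef item, (pvQty item "quantity_available").getD 0, (pvQty item "quantity_reserved").getD 0)]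
    else acc) []
  let index := (PySem.List.dedup (ts.map (·.1))).foldl
    (fun d ref =>
      let group := (ts.filter (fun t => t.1 == ref)).map (fun t => (t.2.1, t.2.2))
      d.insert ref (PySem.Dict.mk
        [("quantity_available_total", (group.map (·.1)).sum),
         ("quantity_reserved_total", (group.map (·.2)).sum),
         ("inventory_records", (group.length : Int))]))
    PySem.Dict.empty
  index.items.map (fun p => (p.1, p.2.items))

-- ===== PRECONDITION & SPEC =====
-- Pre_ excludes exactly the inputs where Python A raises ValueError: an item with a
-- non-empty stripped book_reference whose present quantity string is not int()-parsable.
def Pre_build_inventory_index_py (items : List (List (String × String))) : Prop :=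
  (items.all fun item =>
    (pvRef item == "") ||
    ((pvQty item "quantity_available").isSome && (pvQty item "quantity_reserved").isSome)) = true
instance (items : List (List (String × String))) : Decidable (Pre_build_inventory_index_py items) := by unfold Pre_build_inventory_index_py; infer_instance

def pvWitness_build_inventory_index_py : (List (List (String × String))) :=
  [[("book_reference", " b1 "), ("quantity_available", " 7 "), ("quantity_reserved", "+5")],
   [("book_reference", "b1"), ("quantity_available", "1_0")],
   [("book_reference", "   ")],
   [("book_reference", "b2"), ("quantity_reserved", "-3")]]

def Spec_build_inventory_index_py (items : List (List (String × String))) (out : List (String × List (String × Int))) : Prop := out = build_inventory_index_py_alt items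
instance (items : List (List (String × String))) (out : List (String × List (String × Int))) : Decidable (Spec_build_inventory_index_py items out) := by unfold Spec_build_inventory_index_py; infer_instance

-- ===== CLAIM (what is proved, stated in full; the proofs are below) =====
def Claim_equal_build_inventory_index_py : Prop := ∀ (items : List (List (String × String))), Dom_build_inventory_index_py items → Pre_build_inventory_index_py items → Spec_build_inventory_index_py items (build_inventory_index_py items)

-- ===== LEMMAS AND PROOFS =====

theorem build_inventory_index_py_witness_ok :
    Dom_build_inventory_index_py pvWitness_build_inventory_index_py ∧
    Pre_build_inventory_index_py pvWitness_build_inventory_index_py := by decide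


-- the A-side loop step, expressed on a normalized triple (ref, qty_available, qty_reserved)
def stepT (d : PySem.Dict String (PySem.Dict String Int)) (t : String × Int × Int) : PySem.Dict String (PySem.Dict String Int) :=
  let d1 := if d.contains t.1 then d
    else d.insert t.1 (PySem.Dict.mk
      [("quantity_available_total", (0 : Int)), ("quantity_reserved_total", 0), ("inventory_records", 0)])
  let d2 := d1.modify t.1 PySem.Dict.empty (fun d => d.modify "quantity_available_total" 0 (· + t.2.1))
  let d3 := d2.modify t.1 PySem.Dict.empty (fun d => d.modify "quantity_reserved_total" 0 (· + t.2.2))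
  d3.modify t.1 PySem.Dict.empty (fun d => d.modify "inventory_records" 0 (· + 1))

def pvTrip (item : List (String × String)) : String × Int × Int :=
  (pvRef item, (pvQty item "quantity_available").getD 0, (pvQty item "quantity_reserved").getD 0)

def pvInner (ts : List (String × Int × Int)) (r : String) : List (String × Int) :=
  let group := (ts.filter (fun t => t.1 == r)).map (fun t => (t.2.1, t.2.2))
  [("quantity_available_total", (group.map (·.1)).sum),
   ("quantity_reserved_total", (group.map (·.2)).sum),
   ("inventory_records", (group.length : Int))]

-- A's fold over items factors through the normalized triples
theorem foldA_factor (items : List (List (String × String))) (d : PySem.Dict String (PySem.Dict String Int)) :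
    items.foldl (fun index item =>
      let ref := pvRef item
      if ref = "" then index
      else
        let index := if index.contains ref then index
          else index.insert ref (PySem.Dict.mk
            [("quantity_available_total", (0 : Int)),
             ("quantity_reserved_total", 0),
             ("inventory_records", 0)])
        let index := index.modify ref PySem.Dict.empty
          (fun d => d.modify "quantity_available_total" 0 (· + (pvQty item "quantity_available").getD 0))
        let index := index.modify ref PySem.Dict.empty
          (fun d => d.modify "quantity_reserved_total" 0 (· + (pvQty item "quantity_reserved").getD 0))
        index.modify ref PySem.Dict.empty
          (fun d => d.modify "inventory_records" 0 (· + 1))) d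
    = ((items.filter (fun item => pvRef item != "")).map pvTrip).foldl stepT d := by
  induction items generalizing d with
  | nil => rfl
  | cons item items ih =>
    by_cases h : pvRef item = ""
    · simp only [List.foldl_cons, List.filter_cons, h, bne_self_eq_false,
        Bool.false_eq_true, if_false]
      exact ih d
    · simp only [List.foldl_cons, List.filter_cons, bne_iff_ne, ne_eq, h,
        not_false_eq_true, if_true, List.map_cons]
      rw [ih]
      rfl

theorem keys_modify_self (d : PySem.Dict String (PySem.Dict String Int)) (k : String)
    (f : PySem.Dict String Int → PySem.Dict String Int) (hc : d.contains k = true) :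
    (d.modify k PySem.Dict.empty f).keys = d.keys := by
  rw [PySem.Dict.keys_modify, PySem.Dict.keys_insert_of_contains _ _ hc]

theorem contains_modify_self (d : PySem.Dict String (PySem.Dict String Int)) (k : String)
    (f : PySem.Dict String Int → PySem.Dict String Int) :
    (d.modify k PySem.Dict.empty f).contains k = true := by
  rw [PySem.Dict.contains_modify]; simp

theorem keys_stepT (d : PySem.Dict String (PySem.Dict String Int)) (t : String × Int × Int) :
    (stepT d t).keys = if d.contains t.1 = true then d.keys else d.keys ++ [t.1] := by
  by_cases hc : d.contains t.1 = true
  · rw [if_pos hc]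
    simp only [stepT, if_pos hc]
    rw [keys_modify_self _ _ _ (contains_modify_self _ _ _),
      keys_modify_self _ _ _ (contains_modify_self _ _ _),
      keys_modify_self _ _ _ hc]
  · rw [if_neg hc]
    simp only [stepT, if_neg hc]
    rw [keys_modify_self _ _ _ (contains_modify_self _ _ _),
      keys_modify_self _ _ _ (contains_modify_self _ _ _),
      keys_modify_self _ _ _ (PySem.Dict.contains_insert_self _ _ _),
      PySem.Dict.keys_insert_of_not_contains _ _ (Bool.eq_false_iff.mpr hc)]

theorem keys_foldT (ts : List (String × Int × Int)) :
    (ts.foldl stepT PySem.Dict.empty).keys = PySem.List.dedup (ts.map (·.1)) := by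
  induction ts using List.reverseRecOn with
  | nil => rfl
  | append_singleton ts t ih =>
    rw [List.foldl_append, List.foldl_cons, List.foldl_nil, keys_stepT,
      List.map_append, List.map_cons, List.map_nil, PySem.List.dedup_eq_ofList,
      PySem.Set.ofList_append_singleton, PySem.Set.add_eq_ite,
      ← PySem.List.dedup_eq_ofList, ← ih]
    by_cases hc : (ts.foldl stepT PySem.Dict.empty).contains t.1 = true
    · rw [if_pos hc, if_pos ((PySem.Dict.contains_iff_mem_keys _ _).mp hc)]
    · rw [if_neg hc, if_neg (fun hmem => hc ((PySem.Dict.contains_iff_mem_keys _ _).mpr hmem))]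

theorem inner_step (X Y C a q : Int) :
    ((((PySem.Dict.mk [("quantity_available_total", X), ("quantity_reserved_total", Y), ("inventory_records", C)]).modify
        "quantity_available_total" 0 (· + a)).modify
        "quantity_reserved_total" 0 (· + q)).modify
        "inventory_records" 0 (· + 1))
    = PySem.Dict.mk [("quantity_available_total", X + a), ("quantity_reserved_total", Y + q), ("inventory_records", C + 1)] := by
  simp [PySem.Dict.modify, PySem.Dict.insert, PySem.Dict.getD, PySem.Dict.get?, PySem.Dict.contains]

theorem getD_foldT (ts : List (String × Int × Int)) (r : String) :
    (ts.foldl stepT PySem.Dict.empty).getD r PySem.Dict.empty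
    = if r ∈ ts.map (·.1) then PySem.Dict.mk (pvInner ts r) else PySem.Dict.empty := by
  induction ts using List.reverseRecOn with
  | nil => simp [PySem.Dict.getD_empty]
  | append_singleton ts t ih =>
    rw [List.foldl_append, List.foldl_cons, List.foldl_nil]
    set D := ts.foldl stepT PySem.Dict.empty with hD
    by_cases hr : r = t.1
    · subst hr
      simp only [stepT]
      rw [PySem.Dict.getD_modify, if_pos rfl, PySem.Dict.getD_modify, if_pos rfl,
        PySem.Dict.getD_modify, if_pos rfl]
      by_cases hc : D.contains t.1 = true
      · -- existing key: the three modifies add onto the accumulated inner totals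
        have hmem : t.1 ∈ ts.map (·.1) := by
          have := (PySem.Dict.contains_iff_mem_keys _ _).mp hc
          rw [hD, keys_foldT] at this
          simpa [PySem.List.dedup_eq_ofList, PySem.Set.mem_ofList] using this
        rw [if_pos hc, ih, if_pos hmem, if_pos (by simp [List.map_append, hmem])]
        simp only [pvInner, inner_step]
        apply PySem.Dict.ext
        simp [List.filter_append, List.map_append, List.sum_append]
      · -- fresh key: starts from the zero dict; no earlier triple has this ref
        have hnmem : t.1 ∉ ts.map (·.1) := by
          intro hmem
          exact hc ((PySem.Dict.contains_iff_mem_keys _ _).mpr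
            (by rw [hD, keys_foldT]; simp [PySem.List.dedup_eq_ofList, PySem.Set.mem_ofList, hmem]))
        have hfilter : ts.filter (fun t' => t'.1 == t.1) = [] := by
          rw [List.filter_eq_nil_iff]
          intro x hx hbeq
          exact hnmem (List.mem_map.mpr ⟨x, hx, beq_iff_eq.mp hbeq⟩)
        rw [if_neg hc, PySem.Dict.getD_insert, if_pos rfl, inner_step,
          if_pos (by simp [List.map_append])]
        simp [pvInner, List.filter_append, hfilter]
    · -- other keys are untouched by this step
      simp only [stepT]
      rw [PySem.Dict.getD_modify, if_neg hr, PySem.Dict.getD_modify, if_neg hr,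
        PySem.Dict.getD_modify, if_neg hr]
      have hstep : (if D.contains t.1 = true then D
          else D.insert t.1 (PySem.Dict.mk
            [("quantity_available_total", (0 : Int)), ("quantity_reserved_total", 0), ("inventory_records", 0)])).getD r PySem.Dict.empty
          = D.getD r PySem.Dict.empty := by
        by_cases hc : D.contains t.1 = true
        · rw [if_pos hc]
        · rw [if_neg hc, PySem.Dict.getD_insert, if_neg hr]
      have hbeq : (t.1 == r) = false := by simpa using fun h => hr h.symm
      rw [hstep, ih]
      simp only [pvInner, List.filter_append, List.filter_cons, List.filter_nil, hbeq,
        Bool.false_eq_true, if_false, List.append_nil]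
      by_cases hm : r ∈ List.map (fun x => x.1) ts
      · rw [if_pos hm, if_pos (by simp [List.map_append, hm])]
      · rw [if_neg hm, if_neg (by simp [List.map_append, hm, hr])]

theorem build_common (ts : List (String × Int × Int)) :
    ((ts.foldl stepT PySem.Dict.empty).items).map (fun p => (p.1, p.2.items))
    = (PySem.List.dedup (ts.map (·.1))).map (fun r => (r, pvInner ts r)) := by
  have hnd : (ts.foldl stepT PySem.Dict.empty).keys.Nodup := by
    rw [keys_foldT]; exact PySem.List.nodup_dedup _
  rw [PySem.Dict.items_eq_map_keys _ hnd PySem.Dict.empty, List.map_map, keys_foldT]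
  apply List.map_congr_left
  intro r hrmem
  have hmem : r ∈ ts.map (·.1) := by
    simpa [PySem.List.dedup_eq_ofList, PySem.Set.mem_ofList] using hrmem
  simp only [Function.comp_apply, getD_foldT, if_pos hmem]

theorem alt_eq_common (items : List (List (String × String))) :
    build_inventory_index_py_alt items
    = (PySem.List.dedup ((((items.filter (fun item => pvRef item != "")).map pvTrip)).map (·.1))).map
        (fun r => (r, pvInner ((items.filter (fun item => pvRef item != "")).map pvTrip) r)) := by
  unfold build_inventory_index_py_alt
  rw [show (items.foldl (fun acc item =>
      if pvRef item != "" then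
        acc ++ [(pvRef item, (pvQty item "quantity_available").getD 0, (pvQty item "quantity_reserved").getD 0)]
      else acc) []) = (items.filter (fun item => pvRef item != "")).map pvTrip from
    PySem.List.foldl_append_if (fun item => pvRef item != "") pvTrip items []]
  set ts := (items.filter (fun item => pvRef item != "")).map pvTrip with hts
  dsimp only
  rw [PySem.Dict.items_foldl_insert_fresh (PySem.List.dedup (ts.map (·.1)))
      (fun r => r)
      (fun r => PySem.Dict.mk
        [("quantity_available_total", (((ts.filter (fun t => t.1 == r)).map (fun t => (t.2.1, t.2.2))).map (·.1)).sum),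
         ("quantity_reserved_total", (((ts.filter (fun t => t.1 == r)).map (fun t => (t.2.1, t.2.2))).map (·.2)).sum),
         ("inventory_records", (((ts.filter (fun t => t.1 == r)).map (fun t => (t.2.1, t.2.2))).length : Int))])
      PySem.Dict.empty
      (fun _ _ => PySem.Dict.contains_empty _)
      (by simp)]
  have he : (PySem.Dict.empty : PySem.Dict String (PySem.Dict String Int)).items = [] := rfl
  rw [he, List.nil_append, List.map_map]
  rfl

-- ===== VERDICT (by name: the statement is the Claim_ definition above) =====
theorem build_inventory_index_py_spec : Claim_equal_build_inventory_index_py := by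
  intro items _ _
  unfold Spec_build_inventory_index_py
  rw [alt_eq_common]
  unfold build_inventory_index_py
  rw [foldA_factor, build_common]
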